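-- pv_equiv track=rewrite | github.com/VincenzoImp/Python-Exercises | 2018-19/homework01bis/program01.py | es1
-- ===== SOURCE A (Python) =====
-- def es1(n,c,k):
--     lista = [i for i in range(1,n+1)]
--     a = 0
--
--     while k < n:
--         a += c
--         if a >= n: a = a % n
--         del lista[a]
--         n = len(lista)
--
--     return lista
-- ===== SOURCE B (Python) =====
-- # B: circular-buffer elimination — keep the survivors in a deque rotated so that
-- # index arithmetic becomes rotations, pop from the front, and sort the survivors
-- # (their values are their original order) at the end.
-- from collections import deque
--
--
-- def es1(n, c, k):
--     d = deque(range(1, n + 1))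
--     a = 0
--     r = 0
--     while k < len(d):
--         m = len(d)
--         a += c
--         if a >= m:
--             a %= m
--         p = a % m
--         d.rotate(r - p)
--         d.popleft()
--         r = p
--     return sorted(d)
-- ===== Notes on version B (the rewrite author's own statement) =====
-- stated objective: alternative
-- what changed: A deletes an index from a Python list in place each round; B keeps the survivors in a circular buffer (collections.deque) rotated so the elimination point is always the front, pops the front, and sorts the surviving values (which are their original order) at the end.
-- outside the precondition, e.g. on es1(-5, 2, -3): A returns [], B raises ZeroDivisionError
import Mathlib
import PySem

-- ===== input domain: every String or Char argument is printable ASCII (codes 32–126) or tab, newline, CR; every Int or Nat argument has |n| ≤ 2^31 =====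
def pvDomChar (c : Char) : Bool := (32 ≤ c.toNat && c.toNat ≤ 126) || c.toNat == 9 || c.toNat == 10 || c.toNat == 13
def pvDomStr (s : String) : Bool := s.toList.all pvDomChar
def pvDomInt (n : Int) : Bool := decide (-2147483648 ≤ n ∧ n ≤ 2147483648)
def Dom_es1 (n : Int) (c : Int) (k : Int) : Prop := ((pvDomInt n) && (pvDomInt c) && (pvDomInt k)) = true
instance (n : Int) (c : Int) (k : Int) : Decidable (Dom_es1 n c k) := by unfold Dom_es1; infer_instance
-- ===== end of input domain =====

-- B replaces A's in-place deletions by a rotated circular buffer (deque) popped at the front,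
-- sorting the survivors (whose values are their original order) at the end: an alternative
-- algorithm of similar cost, not claimed faster.
-- (Both loops are ported with fuel = initial list length, exact because every iteration
-- removes exactly one element; the raise branches of the Pythons return early instead.)

-- ===== PORT A =====

-- 'a' after the optional reduction 'if a >= n: a = a % n' (n = current length)
def a2val (len : Nat) (a : Int) (c : Int) : Int :=
  if a + c ≥ (len : Int) then PySem.Int.mod (a + c) (len : Int) else a + c

def es1Go (c : Int) (k : Int) : Nat → List Int → Int → List Int
  | 0, lista, _a => lista
  | fuel + 1, lista, a =>
    if k < (lista.length : Int) then
      if (lista.length : Int) = 0 ∧ 0 ≤ a + c then lista  -- Python raises ZeroDivisionError on 'a % n'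
      else
        match PySem.List.pop? lista (a2val lista.length a c) with
        | some (_x, rest) => es1Go c k fuel rest (a2val lista.length a c)
        | none => lista  -- Python raises IndexError on 'del lista[a]'
    else lista

def es1 (n : Int) (c : Int) (k : Int) : List Int :=
  es1Go c k (PySem.List.pyRange 1 (n + 1) 1).length (PySem.List.pyRange 1 (n + 1) 1) 0

-- ===== PORT B =====

-- p = a % m : the deletion position on the circular buffer
def pval (len : Nat) (a : Int) (c : Int) : Int :=
  PySem.Int.mod (a2val len a c) (len : Int)

-- d.rotate(r - p), i.e. rotate the deque left by t = (p - r) % m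
def rotv (d : List Int) (t : Int) : List Int :=
  d.drop t.toNat ++ d.take t.toNat

def es1AltGo (c : Int) (k : Int) : Nat → List Int → Int → Int → List Int
  | 0, d, _a, _r => d
  | fuel + 1, d, a, r =>
    if k < (d.length : Int) then
      if (d.length : Int) = 0 then d  -- Python raises ZeroDivisionError on 'a %= m' / 'a % m'
      else
        match rotv d (PySem.Int.mod (pval d.length a c - r) (d.length : Int)) with
        | [] => d  -- unreachable: the deque is nonempty
        | _x :: rest => es1AltGo c k fuel rest (a2val d.length a c) (pval d.length a c)
    else d

def es1_alt (n : Int) (c : Int) (k : Int) : List Int :=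
  PySem.List.sorted
    (es1AltGo c k (PySem.List.pyRange 1 (n + 1) 1).length (PySem.List.pyRange 1 (n + 1) 1) 0 0)
    (fun x => x)

-- ===== PRECONDITION & SPEC =====
-- Pre_ restricts to the natural domain k ≥ 0 (k is a target size; for k < 0 A either raises or,
-- when n ≤ k < 0, returns [] while B raises), and excludes the inputs where A raises an
-- IndexError because the negatively-stepped index walks off the shrinking list.
def Pre_es1 (n : Int) (c : Int) (k : Int) : Prop :=
  0 ≤ k ∧ (n ≤ k ∨ 0 ≤ c ∨ 0 ≤ (n - k) * c + k + 1)
instance (n : Int) (c : Int) (k : Int) : Decidable (Pre_es1 n c k) := by unfold Pre_es1; infer_instance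

def pvWitness_es1 : Int × Int × Int := (6, 2, 3)

def Spec_es1 (n : Int) (c : Int) (k : Int) (out : List Int) : Prop := out = es1_alt n c k
instance (n : Int) (c : Int) (k : Int) (out : List Int) : Decidable (Spec_es1 n c k out) := by unfold Spec_es1; infer_instance

-- ===== CLAIM (what is proved, stated in full; the proofs are below) =====
def Claim_equal_es1 : Prop := ∀ (n : Int) (c : Int) (k : Int), Dom_es1 n c k → Pre_es1 n c k → Spec_es1 n c k (es1 n c k)

-- ===== LEMMAS AND PROOFS =====

-- 'no exception': mirrors es1Go, holding exactly when the loop never hits a raise branch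
def Ok (c : Int) (k : Int) : Nat → List Int → Int → Prop
  | 0, _lista, _a => True
  | fuel + 1, lista, a =>
    if k < (lista.length : Int) then
      ¬((lista.length : Int) = 0 ∧ 0 ≤ a + c) ∧
      (match PySem.List.pop? lista (a2val lista.length a c) with
       | some (_x, rest) => Ok c k fuel rest (a2val lista.length a c)
       | none => False)
    else True

theorem a2val_bounds (len : Nat) (a c : Int) (hlen : 0 < len) (ha : 0 ≤ a) (hc : 0 ≤ c) :
    0 ≤ a2val len a c ∧ a2val len a c < (len : Int) := by
  unfold a2val
  have hl : (0 : Int) < (len : Int) := by exact_mod_cast hlen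
  split
  · rw [PySem.Int.mod_eq_emod_of_pos hl]
    exact ⟨Int.emod_nonneg _ (by omega), Int.emod_lt_of_pos _ hl⟩
  · omega

-- a successful 'del lista[a]': the canonical index i, its value a % len, and the result
theorem pop?_inrange (xs : List Int) (j : Int) (h0 : -(xs.length : Int) ≤ j)
    (h1 : j < (xs.length : Int)) :
    ∃ (i : Nat) (x : Int), i < xs.length ∧ (i : Int) = PySem.Int.mod j (xs.length : Int) ∧
      PySem.List.pop? xs j = some (x, xs.eraseIdx i) := by
  have hpos : 0 < xs.length := by omega
  have hmod : PySem.Int.mod j (xs.length : Int) = j % (xs.length : Int) :=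
    PySem.Int.mod_eq_emod_of_pos (by exact_mod_cast hpos)
  by_cases hj : 0 ≤ j
  · refine ⟨j.toNat, xs[j.toNat]'(by omega), by omega, ?_, ?_⟩
    · rw [hmod, Int.emod_eq_of_lt hj h1]; omega
    · simp [PySem.List.pop?, PySem.List.pyIdx?, hj, h1]
  · have hme : j % (xs.length : Int) = j + xs.length := by
      have h2 : (j + (xs.length : Int)) % (xs.length : Int) = j + xs.length :=
        Int.emod_eq_of_lt (by omega) (by omega)
      have h3 : (j + (xs.length : Int) * 1) % (xs.length : Int) = j % (xs.length : Int) :=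
        Int.add_mul_emod_self_left j (xs.length : Int) 1
      rw [mul_one] at h3
      rw [h3] at h2
      exact h2
    refine ⟨xs.length - (-j).toNat, xs[xs.length - (-j).toNat]'(by omega), by omega, ?_, ?_⟩
    · rw [hmod, hme]; omega
    · simp [PySem.List.pop?, PySem.List.pyIdx?, hj, h0]

theorem pop?_some_bounds {xs : List Int} {j : Int} {p : Int × List Int}
    (h : PySem.List.pop? xs j = some p) : -(xs.length : Int) ≤ j ∧ j < (xs.length : Int) := by
  unfold PySem.List.pop? PySem.List.pyIdx? at h
  split at h
  · split at h
    · next h1 h2 => exact ⟨by omega, h2⟩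
    · simp at h
  · split at h
    · next h1 h2 => exact ⟨h2, by omega⟩
    · simp at h

theorem sublist_of_pop? {xs rest : List Int} {j x : Int}
    (h : PySem.List.pop? xs j = some (x, rest)) : rest.Sublist xs := by
  unfold PySem.List.pop? at h
  cases hidx : PySem.List.pyIdx? xs.length j with
  | none => rw [hidx] at h; simp at h
  | some i =>
    rw [hidx] at h
    simp only [Option.bind_some] at h
    cases hget : xs[i]? with
    | none => rw [hget] at h; simp at h
    | some y =>
      rw [hget] at h
      simp only [Option.map_some, Option.some.injEq, Prod.mk.injEq] at h
      rw [← h.2]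
      exact List.eraseIdx_sublist xs i

-- the result of A's loop is a sublist of the starting list
theorem es1Go_sublist (c k : Int) : ∀ (fuel : Nat) (lista : List Int) (a : Int),
    (es1Go c k fuel lista a).Sublist lista := by
  intro fuel
  induction fuel with
  | zero => intro lista a; simp [es1Go]
  | succ fuel ih =>
    intro lista a
    rw [es1Go]
    split
    · split
      · exact List.Sublist.refl _
      · split
        · next _x rest heq =>
          exact (ih _ _).trans (sublist_of_pop? heq)
        · exact List.Sublist.refl _
    · exact List.Sublist.refl _

-- rotating a rotation
theorem rot_rot (l : List Int) (r t : Nat) (hr : r ≤ l.length) (ht : t ≤ l.length) :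
    ((l.drop r ++ l.take r).drop t ++ (l.drop r ++ l.take r).take t) =
      (if r + t ≤ l.length then l.drop (r + t) ++ l.take (r + t)
       else l.drop (r + t - l.length) ++ l.take (r + t - l.length)) := by
  have hdl : (l.drop r).length = l.length - r := by simp
  have htl : (l.take r).length = r := by simp; omega
  rw [List.drop_append, List.take_append, hdl]
  by_cases h : r + t ≤ l.length
  · rw [if_pos h]
    have e1 : t - (l.length - r) = 0 := by omega
    rw [e1, List.drop_zero, List.take_zero, List.append_nil]
    rw [List.drop_drop, List.take_add, ← List.append_assoc]
  · rw [if_neg h]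
    have e1 : List.drop t (List.drop r l) = [] := List.drop_eq_nil_of_le (by simp; omega)
    have e2 : List.take t (List.drop r l) = List.drop r l := List.take_of_length_le (by simp; omega)
    rw [e1, e2, List.nil_append]
    have e3 : t - (l.length - r) = r + t - l.length := by omega
    rw [e3]
    have h2 : List.take (r + t - l.length) (List.take r l) = List.take (r + t - l.length) l := by
      rw [List.take_take]; congr 1; omega
    have h3 : List.drop (r + t - l.length) l
        = List.drop (r + t - l.length) (List.take r l) ++ List.drop r l := by
      conv_lhs => rw [← List.take_append_drop r l]
      rw [List.drop_append, htl]
      simp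
      omega
    rw [h2, h3, List.append_assoc]

-- popping the front of the rotation at i deletes index i and leaves a rotation at i
theorem rot_erase (l : List Int) (i : Nat) (hi : i < l.length) :
    l.drop (i + 1) ++ l.take i = (l.eraseIdx i).drop i ++ (l.eraseIdx i).take i := by
  have hlen : (l.take i).length = i := by simp; omega
  rw [List.eraseIdx_eq_take_drop_succ, List.drop_append, List.take_append, hlen]
  have h1 : List.drop i (List.take i l) = [] := List.drop_eq_nil_of_le (by omega)
  have h2 : List.take i (List.take i l) = List.take i l := by rw [List.take_take, min_self]
  rw [h1, h2, Nat.sub_self, List.nil_append, List.drop_zero]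
  rw [List.take_zero, List.append_nil]

theorem emod_small (x m : Int) (h0 : -m ≤ x) (h1 : x < m) :
    x % m = x ∨ x % m = x + m := by
  by_cases hx : 0 ≤ x
  · exact Or.inl (Int.emod_eq_of_lt hx h1)
  · right
    have h2 : (x + m) % m = x + m := Int.emod_eq_of_lt (by omega) (by omega)
    have h3 : (x + m * 1) % m = x % m := Int.add_mul_emod_self_left x m 1
    rw [mul_one] at h3
    rw [h3] at h2
    exact h2

-- two rotation amounts that agree modulo the length rotate equally
theorem rot_eq_of (l : List Int) (s i : Nat) (hs : s ≤ l.length) (hi : i < l.length)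
    (hcong : s = i ∨ s = i + l.length) :
    l.drop s ++ l.take s = l.drop i ++ l.take i := by
  rcases hcong with h | h
  · rw [h]
  · have hi0 : i = 0 := by omega
    have hsl : s = l.length := by omega
    rw [hi0, hsl]
    simp [List.drop_eq_nil_of_le, List.take_of_length_le]

-- main invariant: B's loop on any rotation of A's list yields a permutation of A's result
theorem main_perm (c k : Int) (hk : 0 ≤ k) : ∀ (fuel : Nat) (lista : List Int) (a : Int) (r : Nat),
    lista.length ≤ fuel → r ≤ lista.length → Ok c k fuel lista a →
    (es1AltGo c k fuel (lista.drop r ++ lista.take r) a (r : Int)).Perm (es1Go c k fuel lista a) := by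
  intro fuel
  induction fuel with
  | zero =>
    intro lista a r hfuel _ _
    have : lista = [] := List.eq_nil_of_length_eq_zero (by omega)
    subst this
    simp [es1AltGo, es1Go]
  | succ fuel ih =>
    intro lista a r hfuel hr hOk
    have hlenrot : (lista.drop r ++ lista.take r).length = lista.length := by
      simp
      omega
    rw [es1AltGo, es1Go, hlenrot]
    by_cases hkl : k < (lista.length : Int)
    · rw [if_pos hkl, if_pos hkl]
      have hpos : 0 < lista.length := by omega
      rw [if_neg (by omega : ¬ ((lista.length : Int) = 0)),
          if_neg (by omega : ¬ ((lista.length : Int) = 0 ∧ 0 ≤ a + c))]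
      rw [Ok, if_pos hkl] at hOk
      obtain ⟨-, hmatch⟩ := hOk
      cases hpop : PySem.List.pop? lista (a2val lista.length a c) with
      | none => rw [hpop] at hmatch; simp at hmatch
      | some pr =>
        obtain ⟨x, rest'⟩ := pr
        rw [hpop] at hmatch
        obtain ⟨hb0, hb1⟩ := pop?_some_bounds hpop
        obtain ⟨i, x', hi, hieq, hpop'⟩ := pop?_inrange lista (a2val lista.length a c) hb0 hb1
        rw [hpop] at hpop'
        have hrest : rest' = lista.eraseIdx i := by
          injection hpop' with h1
          simpa using congrArg Prod.snd h1
        have hLpos : (0 : Int) < (lista.length : Int) := by exact_mod_cast hpos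
        have hpv : pval lista.length a c = (i : Int) := hieq.symm
        set t : Int := PySem.Int.mod (pval lista.length a c - (r : Int)) (lista.length : Int) with hts
        have htemod : t = ((i : Int) - (r : Int)) % (lista.length : Int) := by
          rw [hts, hpv, PySem.Int.mod_eq_emod_of_pos hLpos]
        have ht01 : 0 ≤ t ∧ t < (lista.length : Int) := by
          rw [htemod]
          exact ⟨Int.emod_nonneg _ (by omega), Int.emod_lt_of_pos _ hLpos⟩
        have htcase : t = (i : Int) - r ∨ t = (i : Int) - r + lista.length := by
          rw [htemod]
          exact emod_small _ _ (by omega) (by omega)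
        have hscrut : rotv (lista.drop r ++ lista.take r) t
            = lista.drop i ++ lista.take i := by
          unfold rotv
          rw [rot_rot lista r t.toNat hr (by omega)]
          split
          · next hle =>
            apply rot_eq_of _ _ _ (by omega) hi
            omega
          · next hle =>
            apply rot_eq_of _ _ _ (by omega) hi
            omega
        have hconsform : lista.drop i ++ lista.take i
            = lista[i] :: ((lista.eraseIdx i).drop i ++ (lista.eraseIdx i).take i) := by
          rw [← rot_erase lista i hi, ← List.getElem_cons_drop hi, List.cons_append]
        have hmatch' : Ok c k fuel (lista.eraseIdx i) (a2val lista.length a c) := by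
          rw [hrest] at hmatch
          exact hmatch
        have hlen' : (lista.eraseIdx i).length = lista.length - 1 :=
          List.length_eraseIdx_of_lt hi
        rw [hscrut, hconsform, hrest, hpv]
        exact ih (lista.eraseIdx i) (a2val lista.length a c) i (by omega) (by omega) hmatch'
    · rw [if_neg hkl, if_neg hkl]
      exact List.perm_append_comm.trans (List.Perm.of_eq (List.take_append_drop r lista))

-- A's loop raises nothing when c ≥ 0
theorem okA (c k : Int) (hk : 0 ≤ k) (hc : 0 ≤ c) : ∀ (fuel : Nat) (lista : List Int) (a : Int),
    0 ≤ a → Ok c k fuel lista a := by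
  intro fuel
  induction fuel with
  | zero => intro lista a _; trivial
  | succ fuel ih =>
    intro lista a ha
    rw [Ok]
    split
    · next hkl =>
      have hpos : 0 < lista.length := by omega
      obtain ⟨hb0, hb1⟩ := a2val_bounds lista.length a c hpos (by omega) hc
      refine ⟨by omega, ?_⟩
      obtain ⟨i, x, hi, hieq, hpop⟩ := pop?_inrange lista (a2val lista.length a c) (by omega) hb1
      rw [hpop]
      exact ih _ _ hb0
    · trivial

-- A's loop raises nothing when c < 0 but the slack bound holds
theorem okB (c k : Int) (hk : 0 ≤ k) (hc : c < 0) : ∀ (fuel : Nat) (lista : List Int) (a : Int),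
    a ≤ 0 →
    (k < (lista.length : Int) → 0 ≤ a + ((lista.length : Int) - k) * c + k + 1) →
    Ok c k fuel lista a := by
  intro fuel
  induction fuel with
  | zero => intro lista a _ _; trivial
  | succ fuel ih =>
    intro lista a ha hbound
    rw [Ok]
    split
    · next hkl =>
      have hpos : 0 < lista.length := by omega
      set L : Int := (lista.length : Int) with hL
      have hb := hbound hkl
      have hslack : 0 ≤ (L - k - 1) * (1 - c) := mul_nonneg (by omega) (by omega)
      have hring : (L - k - 1) * (1 - c) = L - k - 1 - (L - k) * c + c := by ring
      have hkey : 0 ≤ a + c + L := by nlinarith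
      have ha1 : a2val lista.length a c = a + c := by
        unfold a2val
        rw [if_neg (by omega)]
      refine ⟨by omega, ?_⟩
      obtain ⟨i, x, hi, hieq, hpop⟩ := pop?_inrange lista (a + c) (by omega) (by omega)
      rw [ha1, hpop]
      apply ih _ _ (by omega)
      intro hkl2
      have hlen' : ((lista.eraseIdx i).length : Int) = L - 1 := by
        rw [List.length_eraseIdx_of_lt hi]; omega
      rw [hlen']
      have : a + c + (L - 1 - k) * c = a + (L - k) * c := by ring
      omega
    · trivial

-- ===== VERDICT (by name: the statement is the Claim_ definition above) =====
theorem es1_spec : Claim_equal_es1 := by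
  unfold Claim_equal_es1
  rintro n c k _ ⟨hk, hdisj⟩
  unfold Spec_es1 es1 es1_alt
  have hlen : (PySem.List.pyRange 1 (n + 1) 1).length = (n + 1 - 1).toNat :=
    PySem.List.length_pyRange_one 1 (n + 1)
  have hOk : Ok c k (PySem.List.pyRange 1 (n + 1) 1).length (PySem.List.pyRange 1 (n + 1) 1) 0 := by
    by_cases hc : 0 ≤ c
    · exact okA c k hk hc _ _ _ le_rfl
    · apply okB c k hk (by omega) _ _ _ le_rfl
      intro hkl
      rw [hlen] at hkl ⊢
      rcases hdisj with hnk | hc' | hbound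
      · exfalso; omega
      · exfalso; omega
      · have hn : ((n + 1 - 1).toNat : Int) = n := by omega
        rw [hn]
        omega
  have hperm := main_perm c k hk (PySem.List.pyRange 1 (n + 1) 1).length
    (PySem.List.pyRange 1 (n + 1) 1) 0 0 le_rfl (Nat.zero_le _) hOk
  have hrot0 : (PySem.List.pyRange 1 (n + 1) 1).drop 0 ++ (PySem.List.pyRange 1 (n + 1) 1).take 0
      = PySem.List.pyRange 1 (n + 1) 1 := by simp
  rw [hrot0, Nat.cast_zero] at hperm
  have hpair : (es1Go c k (PySem.List.pyRange 1 (n + 1) 1).length (PySem.List.pyRange 1 (n + 1) 1) 0).Pairwise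
      (fun a b => (fun x => x) a < (fun x => x) b) :=
    List.Pairwise.sublist (es1Go_sublist c k _ _ _) (PySem.List.pairwise_lt_pyRange_one 1 (n + 1))
  exact (PySem.List.sorted_eq_of_perm_of_pairwise_lt _ _ _ hperm.symm hpair).symm
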